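-- pv_equiv track=rewrite | github.com/felixxx22/gzip | gzip.py | __code_length_map
-- ===== SOURCE A (Python) =====
-- def __code_length_map(code, length):
--     res = []
--     if code == 0:
--         while length > 0:
--             if length <= 2:
--                 for _ in range(length):
--                     res.append(code)
--
--                 return res
--
--             if 3 <= length <= 10:
--                 res.append(17)
--                 res.append(length-3)
--                 return res
--
--             if 11 <= length <= 138:
--                 res.append(18)
--                 res.append(length-11)
--                 return res
--
--             if length > 138:
--                 res.append(18)
--                 res.append(138-11)
--                 length -= 138
--
--         return res
--
--     else:
--         while length > 3:
--             res.append(code)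
--             length-=1
--
--             if 3 <= length <= 6:
--                 res.append(16)
--                 res.append(length-3)
--                 return res
--
--             if length > 6:
--                 res.append(16)
--                 res.append(6-3)
--                 length-=6
--
--         if length <= 3:
--             for _ in range(length):
--                 res.append(code)
--
--         return res
-- ===== SOURCE B (Python) =====
-- def __code_length_map(code, length):
--     if length <= 0:
--         return []
--     if code == 0:
--         k, r0 = divmod(length - 1, 138)
--         r = r0 + 1
--         res = [18, 127] * k
--         if r <= 2:
--             res += [0] * r
--         elif r <= 10:
--             res += [17, r - 3]
--         else:
--             res += [18, r - 11]
--         return res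
--     else:
--         k, r0 = divmod(length - 1, 7)
--         r = r0 + 1
--         res = [code, 16, 3] * k
--         if r <= 3:
--             res += [code] * r
--         else:
--             res += [code, 16, r - 4]
--         return res
-- ===== Notes on version B (the rewrite author's own statement) =====
-- stated objective: simpler
-- what changed: Replaces A's decrement-loops with a closed-form divmod: the number of full runs ([18,127] per 138 zeros, [code,16,3] per 7 nonzeros) and the leftover bucket are computed arithmetically, then the result is built by list multiplication.
import Mathlib
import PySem

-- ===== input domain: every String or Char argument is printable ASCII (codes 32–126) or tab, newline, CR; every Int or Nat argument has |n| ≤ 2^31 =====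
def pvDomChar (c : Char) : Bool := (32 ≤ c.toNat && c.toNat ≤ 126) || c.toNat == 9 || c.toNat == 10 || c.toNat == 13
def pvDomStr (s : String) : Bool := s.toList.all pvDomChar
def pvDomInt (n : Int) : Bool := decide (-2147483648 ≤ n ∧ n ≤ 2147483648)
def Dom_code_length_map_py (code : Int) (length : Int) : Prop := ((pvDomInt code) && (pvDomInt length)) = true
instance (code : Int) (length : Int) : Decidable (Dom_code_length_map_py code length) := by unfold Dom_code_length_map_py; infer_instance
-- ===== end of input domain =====

-- B replaces A's decrement-loops by a closed-form divmod count of full runs plus a leftover bucket (objective: simpler).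

-- ===== PORT A =====
-- the `while length > 0` loop of the code == 0 branch
def pvLoopZero (code : Int) (length : Int) (res : List Int) : List Int :=
  if length > 0 then
    if length ≤ 2 then res ++ List.replicate length.toNat code
    else if 3 ≤ length ∧ length ≤ 10 then res ++ [17, length - 3]
    else if 11 ≤ length ∧ length ≤ 138 then res ++ [18, length - 11]
    else if h : length > 138 then pvLoopZero code (length - 138) (res ++ [18, 138 - 11])
    else res  -- unreachable for integer length (the four guards are exhaustive when length > 0)
  else res
termination_by length.toNat
decreasing_by omega

-- the `while length > 3` loop of the code != 0 branch, followed by the trailing `if length <= 3` replication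
def pvLoopNZ (code : Int) (length : Int) (res : List Int) : List Int :=
  if h : length > 3 then
    -- res.append(code); length -= 1
    if 3 ≤ length - 1 ∧ length - 1 ≤ 6 then (res ++ [code]) ++ [16, (length - 1) - 3]
    else if h2 : length - 1 > 6 then pvLoopNZ code ((length - 1) - 6) ((res ++ [code]) ++ [16, 6 - 3])
    else pvLoopNZ code (length - 1) (res ++ [code])
  else res ++ List.replicate length.toNat code
termination_by length.toNat
decreasing_by all_goals omega

def code_length_map_py (code : Int) (length : Int) : List Int :=
  if code = 0 then pvLoopZero code length [] else pvLoopNZ code length []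

-- ===== PORT B =====
def code_length_map_py_alt (code : Int) (length : Int) : List Int :=
  if length ≤ 0 then []
  else if code = 0 then
    let k := PySem.Int.floordiv (length - 1) 138
    let r := PySem.Int.mod (length - 1) 138 + 1
    let res := (List.replicate k.toNat ([18, 127] : List Int)).flatten
    if r ≤ 2 then res ++ List.replicate r.toNat 0
    else if r ≤ 10 then res ++ [17, r - 3]
    else res ++ [18, r - 11]
  else
    let k := PySem.Int.floordiv (length - 1) 7
    let r := PySem.Int.mod (length - 1) 7 + 1
    let res := (List.replicate k.toNat ([code, 16, 3] : List Int)).flatten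
    if r ≤ 3 then res ++ List.replicate r.toNat code
    else res ++ [code, 16, r - 4]

-- ===== PRECONDITION & SPEC =====
def Spec_code_length_map_py (code : Int) (length : Int) (out : List Int) : Prop := out = code_length_map_py_alt code length
instance (code : Int) (length : Int) (out : List Int) : Decidable (Spec_code_length_map_py code length out) := by unfold Spec_code_length_map_py; infer_instance

-- ===== CLAIM (what is proved, stated in full; the proofs are below) =====
def Claim_equal_code_length_map_py : Prop := ∀ (code : Int) (length : Int), Dom_code_length_map_py code length → Spec_code_length_map_py code length (code_length_map_py code length)

-- ===== LEMMAS AND PROOFS =====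

lemma pvZero_eq (n : Nat) : ∀ (length : Int), length.toNat ≤ n → ∀ res : List Int,
    pvLoopZero 0 length res = res ++ code_length_map_py_alt 0 length := by
  induction n with
  | zero =>
    intro length hl res
    have hle : length ≤ 0 := by omega
    rw [pvLoopZero, code_length_map_py_alt]
    simp [hle, not_lt.mpr hle]
  | succ n ih =>
    intro length hl res
    rw [pvLoopZero]
    by_cases hpos : length > 0
    · have hd : PySem.Int.floordiv (length - 1) 138 = (length - 1) / 138 :=
        PySem.Int.floordiv_eq_ediv_of_pos (by omega)
      have hm : PySem.Int.mod (length - 1) 138 = (length - 1) % 138 :=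
        PySem.Int.mod_eq_emod_of_pos (by omega)
      by_cases h138 : length ≤ 138
      · -- no full run: k = 0, r = length
        have hk : (length - 1) / 138 = 0 := by omega
        have hr : (length - 1) % 138 = length - 1 := by omega
        rw [code_length_map_py_alt]
        simp only [hd, hm, hk, hr, not_le.mpr hpos, if_false]
        by_cases h2 : length ≤ 2
        · simp [hpos, h2, show length - 1 + 1 = length by ring]
        · by_cases h10 : length ≤ 10
          · simp [hpos, h2, h10, show (3:Int) ≤ length by omega]
          · simp [hpos, h2, h10, show (11:Int) ≤ length by omega, h138]
      · -- one full [18,127] run peels off; k decreases by one, r is unchanged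
        have hgt : length > 138 := by omega
        have step := ih (length - 138) (by omega) (res ++ [18, 138 - 11])
        simp only [hpos, if_true, show ¬ (length ≤ 2) by omega, if_false,
          show ¬ (3 ≤ length ∧ length ≤ 10) by omega, if_false,
          show ¬ (11 ≤ length ∧ length ≤ 138) by omega, if_false, hgt, dif_pos, step]
        -- now compare the two alt values
        have hd' : PySem.Int.floordiv (length - 138 - 1) 138 = (length - 138 - 1) / 138 :=
          PySem.Int.floordiv_eq_ediv_of_pos (by omega)
        have hm' : PySem.Int.mod (length - 138 - 1) 138 = (length - 138 - 1) % 138 :=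
          PySem.Int.mod_eq_emod_of_pos (by omega)
        have hkrel : (length - 1) / 138 = (length - 138 - 1) / 138 + 1 := by omega
        have hmrel : (length - 1) % 138 = (length - 138 - 1) % 138 := by omega
        rw [code_length_map_py_alt, code_length_map_py_alt]
        simp only [hd, hm, hd', hm', hkrel, hmrel, show ¬ (length ≤ 0) by omega, if_false,
          show ¬ (length - 138 ≤ 0) by omega]
        have htn : ((length - 138 - 1) / 138 + 1).toNat = ((length - 138 - 1) / 138).toNat + 1 := by
          omega
        rw [htn, List.replicate_succ, List.flatten_cons]
        split_ifs <;> simp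
    · rw [code_length_map_py_alt]
      simp [hpos, show length ≤ 0 by omega]

lemma pvNZ_eq (n : Nat) : ∀ (length : Int), length.toNat ≤ n → ∀ (code : Int), code ≠ 0 → ∀ res : List Int,
    pvLoopNZ code length res = res ++ code_length_map_py_alt code length := by
  induction n with
  | zero =>
    intro length hl code hc res
    have hle : length ≤ 0 := by omega
    rw [pvLoopNZ, code_length_map_py_alt]
    simp [show ¬ (length > 3) by omega, hle, show length.toNat = 0 by omega]
  | succ n ih =>
    intro length hl code hc res
    rw [pvLoopNZ]
    by_cases hpos : length > 0
    · have hd : PySem.Int.floordiv (length - 1) 7 = (length - 1) / 7 :=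
        PySem.Int.floordiv_eq_ediv_of_pos (by omega)
      have hm : PySem.Int.mod (length - 1) 7 = (length - 1) % 7 :=
        PySem.Int.mod_eq_emod_of_pos (by omega)
      by_cases h7 : length ≤ 7
      · have hk : (length - 1) / 7 = 0 := by omega
        have hr : (length - 1) % 7 = length - 1 := by omega
        rw [code_length_map_py_alt]
        simp only [hd, hm, hk, hr, show ¬ (length ≤ 0) by omega, if_false, hc, if_false]
        by_cases h3 : length ≤ 3
        · simp [show ¬ (length > 3) by omega, show length - 1 + 1 = length by ring, h3]
        · simp [show length > 3 by omega, show (3:Int) ≤ length - 1 by omega,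
            show length - 1 ≤ 6 by omega, show length - 1 - 3 = length - 1 + 1 - 4 by ring]
      · -- length ≥ 8: one [code,16,3] run peels off
        have hgt : length - 1 > 6 := by omega
        have step := ih (length - 1 - 6) (by omega) code hc ((res ++ [code]) ++ [16, 6 - 3])
        simp only [show length > 3 by omega, dif_pos, show ¬ (3 ≤ length - 1 ∧ length - 1 ≤ 6) by omega,
          if_false, hgt, dif_pos, step]
        have hd' : PySem.Int.floordiv (length - 1 - 6 - 1) 7 = (length - 1 - 6 - 1) / 7 :=
          PySem.Int.floordiv_eq_ediv_of_pos (by omega)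
        have hm' : PySem.Int.mod (length - 1 - 6 - 1) 7 = (length - 1 - 6 - 1) % 7 :=
          PySem.Int.mod_eq_emod_of_pos (by omega)
        have hkrel : (length - 1) / 7 = (length - 1 - 6 - 1) / 7 + 1 := by omega
        have hmrel : (length - 1) % 7 = (length - 1 - 6 - 1) % 7 := by omega
        rw [code_length_map_py_alt, code_length_map_py_alt]
        simp only [hd, hm, hd', hm', hkrel, hmrel, show ¬ (length ≤ 0) by omega, if_false,
          show ¬ (length - 1 - 6 ≤ 0) by omega, hc, if_false]
        have htn : ((length - 1 - 6 - 1) / 7 + 1).toNat = ((length - 1 - 6 - 1) / 7).toNat + 1 := by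
          omega
        rw [htn, List.replicate_succ, List.flatten_cons]
        split_ifs <;> simp
    · rw [pvLoopNZ, code_length_map_py_alt]
      simp [show ¬ (length > 3) by omega, show length ≤ 0 by omega, show length.toNat = 0 by omega]

-- ===== VERDICT (by name: the statement is the Claim_ definition above) =====
theorem code_length_map_py_spec : Claim_equal_code_length_map_py := by
  intro code length _
  unfold Spec_code_length_map_py code_length_map_py
  by_cases hc : code = 0
  · subst hc
    simpa using pvZero_eq length.toNat length le_rfl []
  · simp only [hc, if_false]
    simpa using pvNZ_eq length.toNat length le_rfl code hc []
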